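-- pv_equiv track=rewrite | github.com/JesIriz/Advent-of-code-2023 | part 7/Ej 7-2.py | is_high_card
-- ===== SOURCE A (Python) =====
-- def is_high_card(hand_input):
--     counter = {}
--     for char in hand_input:
--         if char in counter:
--             counter[char] += 1
--         else:
--             counter[char] = 1
--
--     values = list(counter.values())
--     values.sort()
--
--     if values == [1, 1, 1, 1, 1]:
--         return True
--     else:
--         return False
-- ===== SOURCE B (Python) =====
-- def is_high_card(hand_input):
--     return len(hand_input) == 5 and len(set(hand_input)) == 5
-- ===== Notes on version B (the rewrite author's own statement) =====
-- stated objective: simpler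
-- what changed: Replaces the frequency-dictionary loop, value-list extraction and sort with a one-line distinctness test: exactly five characters and five distinct characters.
import Mathlib
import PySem

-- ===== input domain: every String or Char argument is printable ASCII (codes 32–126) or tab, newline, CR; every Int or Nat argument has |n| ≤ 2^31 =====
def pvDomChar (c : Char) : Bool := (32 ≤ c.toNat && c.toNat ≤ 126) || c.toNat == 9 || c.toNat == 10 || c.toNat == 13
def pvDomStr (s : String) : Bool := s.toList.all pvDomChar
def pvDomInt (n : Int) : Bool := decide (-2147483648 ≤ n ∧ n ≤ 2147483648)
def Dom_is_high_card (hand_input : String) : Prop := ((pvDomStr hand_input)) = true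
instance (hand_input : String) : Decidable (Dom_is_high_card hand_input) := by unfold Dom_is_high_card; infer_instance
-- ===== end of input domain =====

-- B replaces A's frequency dictionary, value list and sort with a direct
-- distinctness test (exactly five characters, all distinct); objective: simpler.

-- ===== PORT A =====
def is_high_card (hand_input : String) : Bool :=
  let counter : PySem.Dict Char Int :=
    hand_input.toList.foldl
      (fun d char =>
        if d.contains char then d.modify char 0 (· + 1) else d.insert char 1)
      PySem.Dict.empty
  let values : List Int := counter.values
  let values := PySem.List.sorted values (fun v => v) false
  if values = [1, 1, 1, 1, 1] then true else false

-- ===== PORT B =====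
def is_high_card_alt (hand_input : String) : Bool :=
  decide (PySem.Str.len hand_input = 5) &&
    decide (PySem.Set.len (PySem.Set.ofList hand_input.toList) = 5)

-- ===== PRECONDITION & SPEC =====
def Spec_is_high_card (hand_input : String) (out : Bool) : Prop := out = is_high_card_alt hand_input
instance (hand_input : String) (out : Bool) : Decidable (Spec_is_high_card hand_input out) := by unfold Spec_is_high_card; infer_instance

-- ===== CLAIM (what is proved, stated in full; the proofs are below) =====
def Claim_equal_is_high_card : Prop := ∀ (hand_input : String), Dom_is_high_card hand_input → Spec_is_high_card hand_input (is_high_card hand_input)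

-- ===== LEMMAS AND PROOFS =====

-- A's if/else counting loop builds exactly Counter(xs).
lemma fold_eq_counter (xs : List Char) :
    xs.foldl
      (fun d char =>
        if d.contains char then d.modify char 0 (· + 1) else d.insert char 1)
      PySem.Dict.empty = PySem.Dict.counter xs := by
  rw [PySem.Dict.counter_eq_foldl]
  congr 1
  funext d c
  by_cases h : d.contains c
  · simp [h]
  · rw [PySem.Dict.modify,
      PySem.Dict.getD_of_not_contains d (0 : Int) (by simpa using h)]
    simp [h]

-- The counter's value list is the count of each distinct character, in first-occurrence order.
lemma values_counter (xs : List Char) :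
    (PySem.Dict.counter xs).values
      = (PySem.Set.ofList xs).map (fun k => (xs.count k : Int)) := by
  simp [PySem.Dict.values, PySem.Dict.items_counter, List.map_map, Function.comp_def]

-- set(xs) (first occurrences) is a sublist of xs.
lemma ofList_sublist (xs : List Char) : (PySem.Set.ofList xs).Sublist xs := by
  induction xs with
  | nil => simp [PySem.Set.ofList_nil]
  | cons x xs ih =>
    rw [PySem.Set.ofList_cons]
    have h1 : ((PySem.Set.ofList xs).discard x).Sublist (PySem.Set.ofList xs) := by
      simp only [PySem.Set.discard]
      exact List.filter_sublist
    exact List.Sublist.cons₂ x (h1.trans ih)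

-- A's sorted value list is [1,1,1,1,1] exactly when the hand has 5 characters, all distinct.
lemma sorted_counts_iff (xs : List Char) :
    PySem.List.sorted ((PySem.Set.ofList xs).map (fun k => (xs.count k : Int))) (fun v => v) false
      = [1, 1, 1, 1, 1]
    ↔ xs.length = 5 ∧ (PySem.Set.ofList xs).length = 5 := by
  have hrep : ([1, 1, 1, 1, 1] : List Int) = List.replicate 5 1 := rfl
  constructor
  · intro h
    have hperm : ((PySem.Set.ofList xs).map (fun k => (xs.count k : Int))).Perm
        (List.replicate 5 (1 : Int)) := by
      have := PySem.List.sorted_perm ((PySem.Set.ofList xs).map (fun k => (xs.count k : Int)))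
        (fun v => v) false
      rw [h, hrep] at this
      exact this.symm
    have heq := List.perm_replicate.mp hperm
    obtain ⟨hlen, hall⟩ := List.eq_replicate_iff.mp heq
    have hcount : ∀ a ∈ xs, xs.count a = 1 := by
      intro a ha
      have : ((xs.count a : Int)) = 1 := by
        apply hall
        exact List.mem_map_of_mem ((PySem.Set.mem_ofList xs a).mpr ha)
      exact_mod_cast this
    have hnd : xs.Nodup := List.nodup_iff_count_eq_one.mpr hcount
    have hself : PySem.Set.ofList xs = xs := PySem.Set.ofList_eq_self_of_nodup xs hnd
    refine ⟨?_, by simpa using hlen⟩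
    rw [← hself]
    simpa using hlen
  · rintro ⟨hx, hs⟩
    have hself : PySem.Set.ofList xs = xs :=
      (ofList_sublist xs).eq_of_length (by rw [hs, hx])
    have hnd : xs.Nodup := by rw [← hself]; exact PySem.Set.nodup_ofList xs
    have hmap : (PySem.Set.ofList xs).map (fun k => (xs.count k : Int))
        = List.replicate 5 1 := by
      refine List.eq_replicate_iff.mpr ⟨by simpa using hs, ?_⟩
      intro b hb
      obtain ⟨k, hk, rfl⟩ := List.mem_map.mp hb
      rw [hself] at hk
      exact_mod_cast List.count_eq_one_of_mem hnd hk
    rw [hmap, ← hrep]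
    exact PySem.List.sorted_eq_self_of_pairwise _ _ (by simp [hrep])

-- ===== VERDICT (by name: the statement is the Claim_ definition above) =====
theorem is_high_card_spec : Claim_equal_is_high_card := by
  intro s _
  unfold Spec_is_high_card is_high_card is_high_card_alt
  dsimp only
  rw [fold_eq_counter, values_counter]
  by_cases h : PySem.List.sorted ((PySem.Set.ofList s.toList).map (fun k => (s.toList.count k : Int)))
      (fun v => v) false = [1, 1, 1, 1, 1]
  · obtain ⟨h1, h2⟩ := (sorted_counts_iff s.toList).mp h
    simp [h, PySem.Str.len_eq, PySem.Set.len, h1, h2]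
  · have := (sorted_counts_iff s.toList).not.mp h
    simp only [h, if_false]
    rw [eq_comm, Bool.and_eq_false_iff]
    by_cases h1 : s.toList.length = 5
    · right
      simp only [decide_eq_false_iff_not, PySem.Set.len]
      intro hc
      exact this ⟨h1, by exact_mod_cast hc⟩
    · left
      simp only [decide_eq_false_iff_not, PySem.Str.len_eq]
      exact_mod_cast h1
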